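-- pv_equiv track=rewrite | github.com/HEPHZIBAI/160-Days-of-Daily-Problem-Solving | 8.prifix sum/prifix sum bonus/Number of times graph cuts X-axis.py | touchedXaxis
-- ===== SOURCE A (Python) =====
-- def touchedXaxis(arr):
--     cr=0
--     cu=0
--     ps=0
--
--     for i in arr:
--         cu+=i
--
--         if cu==0 or(cu>0 and ps<0)or (cu<0 and ps>0):
--             cr+=1
--
--         ps=cu
--
--     return cr
-- ===== SOURCE B (Python) =====
-- def touchedXaxis(arr):
--     # Run-length encode the sign sequence of the prefix sums.
--     runs = []          # list of [sign, length], sign in {-1, 0, 1}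
--     p = 0
--     for x in arr:
--         p += x
--         s = (p > 0) - (p < 0)
--         if runs and runs[-1][0] == s:
--             runs[-1][1] += 1
--         else:
--             runs.append([s, 1])
--     # A touch is every point of a zero run, plus every boundary between a
--     # positive run and a negative run (zero runs break that adjacency).
--     zeros = sum(n for s, n in runs if s == 0)
--     flips = sum(1 for (a, _), (b, _) in zip(runs, runs[1:]) if a * b == -1)
--     return zeros + flips
-- ===== Notes on version B (the rewrite author's own statement) =====
-- stated objective: alternative
-- what changed: Instead of A's fused loop testing each new prefix sum against the previous one, B run-length encodes the sign sequence of the prefix sums and computes the answer as the total length of zero-sign runs plus the number of adjacent run pairs with opposite nonzero signs.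
import Mathlib
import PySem

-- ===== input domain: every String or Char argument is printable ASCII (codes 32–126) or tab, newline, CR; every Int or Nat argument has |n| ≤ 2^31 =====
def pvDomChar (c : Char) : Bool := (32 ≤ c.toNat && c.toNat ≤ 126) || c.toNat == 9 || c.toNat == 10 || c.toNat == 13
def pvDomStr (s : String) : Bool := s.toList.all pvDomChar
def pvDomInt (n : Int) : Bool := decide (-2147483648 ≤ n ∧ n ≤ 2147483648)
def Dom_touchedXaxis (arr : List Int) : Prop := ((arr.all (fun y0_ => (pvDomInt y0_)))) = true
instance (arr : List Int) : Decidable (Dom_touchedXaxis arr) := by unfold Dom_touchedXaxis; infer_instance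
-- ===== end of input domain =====

-- B replaces A's fused previous-vs-current test with a run-length encoding of the prefix-sum
-- sign sequence: answer = total length of zero-sign runs + adjacent opposite-sign run pairs
-- (alternative algorithm, same cost).


-- ===== PORT A =====
-- literal transliteration of A's loop: state (cr, cu, ps), ps := cu at the end of each step
def touchedXaxis (arr : List Int) : Int :=
  (arr.foldl
    (fun (s : Int × Int × Int) i =>
      let cu := s.2.1 + i
      let cr := if cu = 0 ∨ (cu > 0 ∧ s.2.2 < 0) ∨ (cu < 0 ∧ s.2.2 > 0) then s.1 + 1 else s.1
      (cr, cu, cu))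
    (0, 0, 0)).1

-- ===== PORT B =====
-- s = (p > 0) - (p < 0)
def pvSign (p : Int) : Int := (if p > 0 then (1 : Int) else 0) - (if p < 0 then 1 else 0)

-- "runs[-1][1] += 1", ported as structural recursion to the last element
def pvBumpLast : List (Int × Int) → List (Int × Int)
  | [] => []
  | [(s, n)] => [(s, n + 1)]
  | a :: b :: r => a :: pvBumpLast (b :: r)

-- the loop of B: build the run-length encoding of the prefix-sum signs
def pvRuns (arr : List Int) : List (Int × Int) :=
  (arr.foldl
    (fun (st : List (Int × Int) × Int) x =>
      let p := st.2 + x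
      let s := pvSign p
      match st.1.getLast? with
      | some (s0, _) => if s0 = s then (pvBumpLast st.1, p) else (st.1 ++ [(s, 1)], p)
      | none => (st.1 ++ [(s, 1)], p))
    ([], 0)).1

def touchedXaxis_alt (arr : List Int) : Int :=
  let runs := pvRuns arr
  let zeros := ((runs.filter (fun r => r.1 == 0)).map (fun r => r.2)).sum
  let flips := (((runs.zip runs.tail).countP (fun q => q.1.1 * q.2.1 == -1) : Nat) : Int)
  zeros + flips

-- ===== PRECONDITION & SPEC =====
def Spec_touchedXaxis (arr : List Int) (out : Int) : Prop := out = touchedXaxis_alt arr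
instance (arr : List Int) (out : Int) : Decidable (Spec_touchedXaxis arr out) := by
  unfold Spec_touchedXaxis; infer_instance

-- ===== CLAIM =====
def Claim_equal_touchedXaxis : Prop :=
  ∀ (arr : List Int), Dom_touchedXaxis arr → Spec_touchedXaxis arr (touchedXaxis arr)

-- ===== LEMMAS AND PROOFS =====

-- per-step contributions
def pvZ (s n : Int) : Int := if s = 0 then n else 0
def pvFlip (a b : Int) : Int := if a * b = -1 then 1 else 0

-- the value B extracts from a runs list, as a front recursion
def pvAns : List (Int × Int) → Int
  | [] => 0
  | a :: l => pvZ a.1 a.2 + (match l with | [] => 0 | b :: _ => pvFlip a.1 b.1) + pvAns l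

-- flip contribution of a head element against the next run
def pvHeadF (a : Int) : List (Int × Int) → Int
  | [] => 0
  | b :: _ => pvFlip a b.1

theorem pvAns_cons (a : Int × Int) (l : List (Int × Int)) :
    pvAns (a :: l) = pvZ a.1 a.2 + pvHeadF a.1 l + pvAns l := by
  cases l <;> rfl

-- sign of the last run (0 when empty)
def pvLastS (l : List (Int × Int)) : Int := ((l.getLast?).map Prod.fst).getD 0

-- sign-based reference count of touches over a suffix, given previous sign and previous prefix sum
def pvCnt (prevS p : Int) : List Int → Int
  | [] => 0
  | x :: xs =>
    let p' := p + x
    let s' := pvSign p'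
    pvZ s' 1 + pvFlip prevS s' + pvCnt s' p' xs

theorem pvFlip_self (s : Int) : pvFlip s s = 0 := by
  unfold pvFlip
  have : ¬ s * s = -1 := by nlinarith [mul_self_nonneg s]
  simp [this]

theorem pvFlip_zero_left (s : Int) : pvFlip 0 s = 0 := by
  unfold pvFlip; simp

-- A's branch condition equals the sign-based per-step contribution
theorem pv_cond_sign (ps cu : Int) :
    (if cu = 0 ∨ (cu > 0 ∧ ps < 0) ∨ (cu < 0 ∧ ps > 0) then (1 : Int) else 0)
      = pvZ (pvSign cu) 1 + pvFlip (pvSign ps) (pvSign cu) := by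
  unfold pvZ pvFlip pvSign
  rcases lt_trichotomy cu 0 with h1 | h1 | h1 <;>
    rcases lt_trichotomy ps 0 with h2 | h2 | h2 <;>
      simp [h1, h2, lt_asymm] <;> omega

-- A's loop from state (cr, cu, cu) computes cr + the sign-based count
theorem pvA_loop (xs : List Int) : ∀ (cr cu : Int),
    (xs.foldl
      (fun (s : Int × Int × Int) i =>
        let c := s.2.1 + i
        let cr' := if c = 0 ∨ (c > 0 ∧ s.2.2 < 0) ∨ (c < 0 ∧ s.2.2 > 0) then s.1 + 1 else s.1
        (cr', c, c))
      (cr, cu, cu)).1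
    = cr + pvCnt (pvSign cu) cu xs := by
  induction xs with
  | nil => intro cr cu; simp [pvCnt]
  | cons x t ih =>
    intro cr cu
    simp only [List.foldl_cons]
    rw [ih]
    show (if cu + x = 0 ∨ (cu + x > 0 ∧ cu < 0) ∨ (cu + x < 0 ∧ cu > 0) then cr + 1 else cr)
        + pvCnt (pvSign (cu + x)) (cu + x) t = cr + pvCnt (pvSign cu) cu (x :: t)
    have h := pv_cond_sign cu (cu + x)
    simp only [pvCnt]
    split_ifs at h ⊢ <;> omega

-- bumping keeps the head run's sign (and nonemptiness)
theorem pvBumpLast_head (b : Int × Int) (r : List (Int × Int)) :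
    ∃ m rest, pvBumpLast (b :: r) = (b.1, m) :: rest := by
  cases r with
  | nil => exact ⟨b.2 + 1, [], by cases b; simp [pvBumpLast]⟩
  | cons c s => exact ⟨b.2, pvBumpLast (c :: s), by cases b; simp [pvBumpLast]⟩

theorem pvLastS_cons_of_ne (a : Int × Int) (l : List (Int × Int)) (h : l ≠ []) :
    pvLastS (a :: l) = pvLastS l := by
  cases l with
  | nil => exact absurd rfl h
  | cons b r => unfold pvLastS; rw [List.getLast?_cons_cons]

theorem pvBumpLast_lastS : ∀ (l : List (Int × Int)), pvLastS (pvBumpLast l) = pvLastS l := by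
  intro l
  induction l with
  | nil => rfl
  | cons a t ih =>
    cases t with
    | nil => cases a; simp [pvBumpLast, pvLastS]
    | cons b r =>
      have hb : pvBumpLast (a :: b :: r) = a :: pvBumpLast (b :: r) := by
        cases a; simp [pvBumpLast]
      obtain ⟨m, rest, hm⟩ := pvBumpLast_head b r
      rw [hb, pvLastS_cons_of_ne a _ (by rw [hm]; simp),
        pvLastS_cons_of_ne a (b :: r) (by simp)]
      exact ih

-- bumping the last run adds pvZ (last sign) 1 to the extracted value
theorem pvBumpLast_ans : ∀ (l : List (Int × Int)), l ≠ [] →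
    pvAns (pvBumpLast l) = pvAns l + pvZ (pvLastS l) 1 := by
  intro l
  induction l with
  | nil => intro h; exact absurd rfl h
  | cons a t ih =>
    intro _
    cases t with
    | nil =>
      cases a with
      | mk s n =>
        simp only [pvBumpLast, pvAns, pvLastS, List.getLast?_singleton, Option.map_some,
          Option.getD_some]
        unfold pvZ; split_ifs <;> omega
    | cons b r =>
      have hb : pvBumpLast (a :: b :: r) = a :: pvBumpLast (b :: r) := by
        cases a; simp [pvBumpLast]
      obtain ⟨m, rest, hm⟩ := pvBumpLast_head b r
      have hlast : pvLastS (a :: b :: r) = pvLastS (b :: r) := by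
        unfold pvLastS; rw [List.getLast?_cons_cons]
      have hrec := ih (by simp)
      rw [hb, pvAns_cons, pvAns_cons a (b :: r), hlast, hrec, hm]
      have h1 : pvHeadF a.1 ((b.1, m) :: rest) = pvFlip a.1 b.1 := rfl
      have h2 : pvHeadF a.1 (b :: r) = pvFlip a.1 b.1 := rfl
      rw [h1, h2]
      ring

-- appending a fresh unit run adds the boundary flip and pvZ s 1
theorem pvAppend_ans : ∀ (l : List (Int × Int)) (s : Int),
    pvAns (l ++ [(s, 1)]) = pvAns l + pvFlip (pvLastS l) s + pvZ s 1 := by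
  intro l
  induction l with
  | nil => intro s; simp [pvAns, pvLastS, pvFlip_zero_left]
  | cons a t ih =>
    intro s
    cases t with
    | nil =>
      cases a with
      | mk a1 a2 =>
        simp only [List.cons_append, List.nil_append, pvAns, pvLastS, List.getLast?_singleton,
          Option.map_some, Option.getD_some]
        omega
    | cons b r =>
      have hlast : pvLastS (a :: b :: r) = pvLastS (b :: r) := by
        unfold pvLastS; rw [List.getLast?_cons_cons]
      have h := ih s
      rw [List.cons_append, pvAns_cons, pvAns_cons a (b :: r), hlast, h]
      have h1 : pvHeadF a.1 ((b :: r) ++ [(s, 1)]) = pvFlip a.1 b.1 := rfl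
      have h2 : pvHeadF a.1 (b :: r) = pvFlip a.1 b.1 := rfl
      rw [h1, h2]
      ring

theorem pvLastS_append (l : List (Int × Int)) (s n : Int) :
    pvLastS (l ++ [(s, n)]) = s := by
  unfold pvLastS
  simp

-- B's loop invariant
theorem pvB_loop (xs : List Int) : ∀ (runs : List (Int × Int)) (p : Int),
    pvLastS runs = pvSign p →
    pvAns ((xs.foldl
      (fun (st : List (Int × Int) × Int) x =>
        let p' := st.2 + x
        let s := pvSign p'
        match st.1.getLast? with
        | some (s0, _) => if s0 = s then (pvBumpLast st.1, p') else (st.1 ++ [(s, 1)], p')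
        | none => (st.1 ++ [(s, 1)], p'))
      (runs, p)).1)
    = pvAns runs + pvCnt (pvSign p) p xs := by
  induction xs with
  | nil => intro runs p _; simp [pvCnt]
  | cons x t ih =>
    intro runs p hinv
    simp only [List.foldl_cons]
    cases hgl : runs.getLast? with
    | none =>
      have hrn : runs = [] := List.getLast?_eq_none_iff.mp hgl
      subst hrn
      have h0 : pvSign p = 0 := by rw [← hinv]; rfl
      simp only [hgl]
      rw [ih ([] ++ [(pvSign (p + x), 1)]) (p + x) (pvLastS_append _ _ _)]
      rw [pvAppend_ans]
      simp only [pvCnt]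
      have : pvLastS ([] : List (Int × Int)) = 0 := rfl
      rw [this, h0, pvFlip_zero_left]
      ring
    | some a =>
      cases a with
      | mk s0 n0 =>
        have hs0 : s0 = pvLastS runs := by unfold pvLastS; rw [hgl]; rfl
        have hrne : runs ≠ [] := by
          intro h; rw [h] at hgl; simp at hgl
        simp only [hgl]
        by_cases hcase : s0 = pvSign (p + x)
        · simp only [if_pos hcase]
          rw [ih (pvBumpLast runs) (p + x)
              (by rw [pvBumpLast_lastS, ← hs0, hcase])]
          rw [pvBumpLast_ans runs hrne]
          simp only [pvCnt]
          have hsame : pvSign p = pvSign (p + x) := by rw [← hinv, ← hs0, hcase]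
          rw [← hs0, hcase, hsame, pvFlip_self]
          ring
        · simp only [if_neg hcase]
          rw [ih (runs ++ [(pvSign (p + x), 1)]) (p + x) (pvLastS_append _ _ _)]
          rw [pvAppend_ans, hinv]
          simp only [pvCnt]
          ring

-- B's extraction pass equals pvAns
theorem pvExtract_eq (runs : List (Int × Int)) :
    ((runs.filter (fun r => r.1 == 0)).map (fun r => r.2)).sum
      + (((runs.zip runs.tail).countP (fun q => q.1.1 * q.2.1 == -1) : Nat) : Int)
    = pvAns runs := by
  induction runs with
  | nil => simp [pvAns]
  | cons a t ih =>
    have hz : ((List.filter (fun r => r.1 == 0) (a :: t)).map (fun r => r.2)).sum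
        = pvZ a.1 a.2 + ((t.filter (fun r => r.1 == 0)).map (fun r => r.2)).sum := by
      by_cases h : a.1 = 0 <;> simp [List.filter_cons, h, pvZ]
    cases t with
    | nil =>
      simp only [pvAns, List.zip_nil_right, List.tail_cons, List.countP_nil] at *
      simpa [hz] using ih
    | cons b r =>
      have hzip : ((a :: b :: r).zip (a :: b :: r).tail)
          = (a, b) :: ((b :: r).zip ((b :: r).tail)) := by simp
      have hcnt : (((a :: b :: r).zip (a :: b :: r).tail).countP
            (fun q => q.1.1 * q.2.1 == -1) : Nat)
          = (if a.1 * b.1 = -1 then 1 else 0)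
            + (((b :: r).zip ((b :: r).tail)).countP (fun q => q.1.1 * q.2.1 == -1)) := by
        rw [hzip, List.countP_cons]
        by_cases h : a.1 * b.1 = -1 <;> simp [h] <;> omega
      have hflip : pvFlip a.1 b.1 = (if a.1 * b.1 = -1 then (1 : Int) else 0) := rfl
      rw [pvAns_cons]
      have h2 : pvHeadF a.1 (b :: r) = pvFlip a.1 b.1 := rfl
      rw [hz, hcnt, h2, hflip, ← ih]
      push_cast
      split_ifs <;> ring

-- ===== VERDICT =====
theorem touchedXaxis_spec : Claim_equal_touchedXaxis := by
  intro arr _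
  unfold Spec_touchedXaxis touchedXaxis touchedXaxis_alt pvRuns
  rw [pvExtract_eq]
  have hA := pvA_loop arr 0 0
  have hB := pvB_loop arr [] 0 (by rfl)
  simp only [zero_add] at hA hB
  rw [hA, hB]
  simp [pvAns]
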